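-- pv_equiv track=rewrite | github.com/wuyuVerse/evoselfcode | evoselfcode/datagen/postprocess/converter.py | _remove_hint
-- ===== SOURCE A (Python) =====
-- def _remove_hint(problem_text: str) -> str:
--     """Remove hint section from problem text.
--
--     Args:
--         problem_text: Original problem description
--
--     Returns:
--         Problem text without hint
--     """
--     # Remove lines starting with "Hint:"
--     lines = problem_text.split('\n')
--     filtered_lines = []
--     skip_rest = False
--
--     for line in lines:
--         if line.strip().startswith("Hint:"):
--             skip_rest = True
--             continue
--         if not skip_rest:
--             filtered_lines.append(line)
--
--     return '\n'.join(filtered_lines).strip()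
-- ===== SOURCE B (Python) =====
-- def _remove_hint(problem_text: str) -> str:
--     """Remove hint section from problem text.
--
--     Computes a single cutoff index on the raw string (start of the first line
--     that, after leading blanks, starts with "Hint:") and slices, instead of
--     splitting into lines and accumulating with a skip flag.
--     """
--     n = len(problem_text)
--     i = 0  # start index of the current line
--     while True:
--         j = i
--         while j < n and problem_text[j] in ' \t\r':
--             j += 1
--         if problem_text.startswith('Hint:', j):
--             return problem_text[:i].strip()
--         k = problem_text.find('\n', i)
--         if k == -1:
--             return problem_text.strip()
--         i = k + 1
-- ===== Notes on version B (the rewrite author's own statement) =====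
-- stated objective: alternative
-- what changed: Instead of splitting into lines and accumulating kept lines with a skip flag, B scans the raw string for the start index of the first line whose leading blanks are followed by the hint marker and returns the stripped slice before it (or the stripped whole text if there is none).
import Mathlib
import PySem

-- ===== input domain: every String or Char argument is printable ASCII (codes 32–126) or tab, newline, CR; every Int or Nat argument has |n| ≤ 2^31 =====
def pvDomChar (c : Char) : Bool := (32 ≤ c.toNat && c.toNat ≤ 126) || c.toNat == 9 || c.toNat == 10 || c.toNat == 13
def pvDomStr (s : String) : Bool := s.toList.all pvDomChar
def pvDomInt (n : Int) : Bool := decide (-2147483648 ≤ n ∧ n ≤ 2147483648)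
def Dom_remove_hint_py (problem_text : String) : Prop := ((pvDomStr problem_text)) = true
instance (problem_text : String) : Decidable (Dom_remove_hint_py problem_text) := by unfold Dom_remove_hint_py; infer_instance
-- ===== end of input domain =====

-- B replaces A's line-splitting loop with a skip flag by a single cutoff-index scan on the
-- raw string (find the start of the first hint line, slice, strip); same cost, alternative structure.

-- ===== PORT A =====
-- literal port of A at the List Char level (PySem.Str.* are thin wrappers over PySem.Chars.*)
def remove_hint_py (problem_text : String) : String :=
  let lines := PySem.Chars.splitOn problem_text.toList "\n".toList
  let st := lines.foldl
    (fun (st : List (List Char) × Bool) line =>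
      if PySem.Chars.startswith (PySem.Chars.strip line) "Hint:".toList then (st.1, true)
      else if !st.2 then (st.1 ++ [line], st.2) else st)
    ([], false)
  String.ofList (PySem.Chars.strip (PySem.Chars.join "\n".toList st.1))

-- ===== PORT B =====
-- port of Source B: the inner `while problem_text[j] in ' \t\r'` skip …
def pvSkipWs : List Char → List Char
  | [] => []
  | c :: r => if c == ' ' || c == '\t' || c == '\r' then pvSkipWs r else c :: r

-- … followed by `problem_text.startswith('Hint:', j)`
def pvHintAt (cs : List Char) : Bool := PySem.Chars.startswith (pvSkipWs cs) "Hint:".toList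

-- `k = problem_text.find('\n', i)`: none = -1, some (before, after) splits at the first newline
def pvBreak : List Char → Option (List Char × List Char)
  | [] => none
  | c :: r => if c == '\n' then some ([], r) else (pvBreak r).map (fun p => (c :: p.1, p.2))

theorem pvBreak_length : ∀ (cs l rest : List Char), pvBreak cs = some (l, rest) → rest.length < cs.length := by
  intro cs
  induction cs with
  | nil => intro l rest h; simp [pvBreak] at h
  | cons c r ih =>
    intro l rest h
    by_cases hc : c = '\n'
    · simp [pvBreak, hc] at h
      have := h.2; subst this; simp
    · simp [pvBreak, hc] at h
      obtain ⟨p1, hp, h2⟩ := h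
      have := ih p1 rest hp
      simp; omega

-- the outer `while True` of Source B: acc = problem_text[:i], cs = problem_text[i:]
def pvLoop (acc : List Char) (cs : List Char) : Option (List Char) :=
  if pvHintAt cs then some acc
  else match h : pvBreak cs with
    | none => none
    | some (l, rest) => pvLoop (acc ++ l ++ ['\n']) rest
termination_by cs.length
decreasing_by exact pvBreak_length cs l rest h

def remove_hint_py_alt (problem_text : String) : String :=
  match pvLoop [] problem_text.toList with
  | some pre => String.ofList (PySem.Chars.strip pre)
  | none => String.ofList (PySem.Chars.strip problem_text.toList)

-- ===== PRECONDITION & SPEC =====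
def Spec_remove_hint_py (problem_text : String) (out : String) : Prop := out = remove_hint_py_alt problem_text
instance (problem_text : String) (out : String) : Decidable (Spec_remove_hint_py problem_text out) := by unfold Spec_remove_hint_py; infer_instance

-- ===== CLAIM (what is proved, stated in full; the proofs are below) =====
def Claim_equal_remove_hint_py : Prop := ∀ (problem_text : String), Dom_remove_hint_py problem_text → Spec_remove_hint_py problem_text (remove_hint_py problem_text)

-- ===== LEMMAS AND PROOFS =====

-- A's per-line test
def pvHintLine (l : List Char) : Bool := PySem.Chars.startswith (PySem.Chars.strip l) "Hint:".toList

-- reference splitter: pvSplit pre cs = the lines of pre ++ cs (the first one extending pre)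
def pvSplit (pre : List Char) : List Char → List (List Char)
  | [] => [pre]
  | c :: r => if c = '\n' then pre :: pvSplit [] r else pvSplit (pre ++ [c]) r

-- A's pre-strip value
def pvApre (cs : List Char) : List Char :=
  PySem.Chars.join "\n".toList ((pvSplit [] cs).takeWhile (fun l => !pvHintLine l))

theorem pvGo_eq : ∀ (l : List Char) (fuel : Nat) (cur : List Char) (acc : List (List Char)),
    l.length < fuel →
    PySem.Chars.splitOn.go ['\n'] fuel l cur acc = acc.reverse ++ pvSplit cur.reverse l := by
  intro l
  induction l with
  | nil =>
    intro fuel cur acc hf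
    obtain ⟨f, rfl⟩ : ∃ f, fuel = f + 1 := ⟨fuel - 1, by omega⟩
    rw [PySem.Chars.splitOn.go]
    · simp [pvSplit]
    · omega
  | cons c r ih =>
    intro fuel cur acc hf
    obtain ⟨f, rfl⟩ : ∃ f, fuel = f + 1 := ⟨fuel - 1, by omega⟩
    simp only [List.length_cons] at hf
    rw [PySem.Chars.splitOn.go]
    · by_cases hc : c = '\n'
      · subst hc
        rw [if_pos (by simp [List.isPrefixOf])]
        rw [show List.drop (['\n'].length) ('\n'::r) = r from rfl]
        rw [ih f [] (cur.reverse :: acc) (by omega)]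
        simp [pvSplit]
      · rw [if_neg (by simp [List.isPrefixOf]; exact fun hcc => hc hcc.symm)]
        rw [ih f (c :: cur) acc (by omega)]
        simp [pvSplit, hc]

theorem pvSplitOn_eq (cs : List Char) : PySem.Chars.splitOn cs "\n".toList = pvSplit [] cs := by
  have h : "\n".toList = ['\n'] := rfl
  rw [h, PySem.Chars.splitOn, pvGo_eq cs (cs.length+1) [] [] (by omega)]
  rfl

-- A's foldl with the skip flag set appends nothing
theorem pvFold_skip (lines : List (List Char)) (acc : List (List Char)) :
    lines.foldl
      (fun (st : List (List Char) × Bool) line =>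
        if PySem.Chars.startswith (PySem.Chars.strip line) "Hint:".toList then (st.1, true)
        else if !st.2 then (st.1 ++ [line], st.2) else st)
      (acc, true) = (acc, true) := by
  induction lines generalizing acc with
  | nil => rfl
  | cons l t ih =>
    simp only [List.foldl_cons]
    by_cases h : PySem.Chars.startswith (PySem.Chars.strip l) "Hint:".toList = true
    · rw [if_pos h]; exact ih acc
    · rw [if_neg h]; exact ih acc

-- A's foldl keeps exactly the lines before the first hint line
theorem pvFold_main (lines : List (List Char)) (acc : List (List Char)) :
    (lines.foldl
      (fun (st : List (List Char) × Bool) line =>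
        if PySem.Chars.startswith (PySem.Chars.strip line) "Hint:".toList then (st.1, true)
        else if !st.2 then (st.1 ++ [line], st.2) else st)
      (acc, false)).1 = acc ++ lines.takeWhile (fun l => !pvHintLine l) := by
  induction lines generalizing acc with
  | nil => simp
  | cons l t ih =>
    simp only [List.foldl_cons, List.takeWhile_cons]
    by_cases h : PySem.Chars.startswith (PySem.Chars.strip l) "Hint:".toList = true
    · rw [if_pos h, pvFold_skip]
      have h' : (!pvHintLine l) = false := by simp only [pvHintLine, h, Bool.not_true]
      simp [h']
    · rw [if_neg h]
      have hb := Bool.eq_false_iff.mpr h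
      have h' : (!pvHintLine l) = true := by simp only [pvHintLine, hb, Bool.not_false]
      refine (ih (acc ++ [l])).trans ?_
      simp [h', List.append_assoc]

theorem pvA_char (t : String) :
    remove_hint_py t = String.ofList (PySem.Chars.strip (pvApre t.toList)) := by
  have h : (List.foldl
      (fun (st : List (List Char) × Bool) line =>
        if PySem.Chars.startswith (PySem.Chars.strip line) "Hint:".toList then (st.1, true)
        else if !st.2 then (st.1 ++ [line], st.2) else st)
      ([], false) (pvSplit [] t.toList)).1
      = (pvSplit [] t.toList).takeWhile (fun l => !pvHintLine l) :=
    (pvFold_main _ []).trans (by simp)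
  unfold remove_hint_py pvApre
  rw [pvSplitOn_eq]
  exact congrArg (fun x => String.ofList (PySem.Chars.strip (PySem.Chars.join "\n".toList x))) h

-- ---- pvBreak / pvSplit on the line decomposition ----

theorem pvBreak_none (cs : List Char) (h : '\n' ∉ cs) : pvBreak cs = none := by
  induction cs with
  | nil => rfl
  | cons c r ih =>
    rw [List.mem_cons] at h; push_neg at h
    have hc : (c == '\n') = false := by simp; exact fun hcc => h.1 hcc.symm
    simp [pvBreak, hc, ih h.2]

theorem pvBreak_app (l rest : List Char) (h : '\n' ∉ l) :
    pvBreak (l ++ '\n' :: rest) = some (l, rest) := by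
  induction l with
  | nil => simp [pvBreak]
  | cons c r ih =>
    rw [List.mem_cons] at h; push_neg at h
    have hc : (c == '\n') = false := by simp; exact fun hcc => h.1 hcc.symm
    simp [pvBreak, hc, ih h.2]

theorem pvSplit_no_nl (pre l : List Char) (h : '\n' ∉ l) : pvSplit pre l = [pre ++ l] := by
  induction l generalizing pre with
  | nil => simp [pvSplit]
  | cons c r ih =>
    rw [List.mem_cons] at h; push_neg at h
    have hc : ¬ (c = '\n') := fun hcc => h.1 hcc.symm
    have e : pvSplit pre (c :: r) = pvSplit (pre ++ [c]) r := by
      simp only [pvSplit, if_neg hc]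
    rw [e, ih _ h.2]; simp

theorem pvSplit_app (pre l rest : List Char) (h : '\n' ∉ l) :
    pvSplit pre (l ++ '\n' :: rest) = (pre ++ l) :: pvSplit [] rest := by
  induction l generalizing pre with
  | nil => simp [pvSplit]
  | cons c r ih =>
    rw [List.mem_cons] at h; push_neg at h
    have hc : ¬ (c = '\n') := fun hcc => h.1 hcc.symm
    have e : pvSplit pre (c :: (r ++ '\n' :: rest)) = pvSplit (pre ++ [c]) (r ++ '\n' :: rest) := by
      simp only [pvSplit, if_neg hc]
    rw [List.cons_append, e, ih _ h.2]; simp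

-- decomposition of a string at its first newline
theorem pvDecomp (cs : List Char) (h : '\n' ∈ cs) :
    ∃ l rest, cs = l ++ '\n' :: rest ∧ '\n' ∉ l := by
  induction cs with
  | nil => cases h
  | cons c r ih =>
    by_cases hc : c = '\n'
    · exact ⟨[], r, by simp [hc], by simp⟩
    · have hr : '\n' ∈ r := by
        rcases List.mem_cons.mp h with h1 | h1
        · exact absurd h1.symm hc
        · exact h1
      obtain ⟨l, rest, h1, h2⟩ := ih hr
      exact ⟨c :: l, rest, by simp [h1], by simp [h2]; exact fun hcc => hc hcc.symm⟩

theorem pvTakeWhile_app (l rest : List Char) (h : '\n' ∉ l) :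
    (l ++ '\n' :: rest).takeWhile (fun c => !(c == '\n')) = l := by
  induction l with
  | nil => simp
  | cons c r ih =>
    rw [List.mem_cons] at h; push_neg at h
    have hc : (c == '\n') = false := by simp; exact fun hcc => h.1 hcc.symm
    simp [List.takeWhile_cons, hc, ih h.2]

-- ---- the hint test: B's raw-string test = A's per-line test on the first line ----

-- a newline-free pattern survives truncation at the first newline
theorem pvPrefixTW : ∀ (p : List Char), '\n' ∉ p →
    ∀ x : List Char, p.isPrefixOf (x.takeWhile (fun c => !(c == '\n'))) = p.isPrefixOf x := by
  intro p
  induction p with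
  | nil => intro _ x; simp [List.isPrefixOf]
  | cons a p' ih =>
    intro hp x
    rw [List.mem_cons] at hp; push_neg at hp
    cases x with
    | nil => rfl
    | cons c r =>
      by_cases hc : c = '\n'
      · subst hc
        have ha : (a == '\n') = false := by simp; exact fun h => hp.1 h.symm
        simp [List.takeWhile_cons, List.isPrefixOf, ha]
      · have hcb : (!(c == '\n')) = true := by simp [hc]
        simp only [List.takeWhile_cons, hcb, if_true, List.isPrefixOf]
        rw [ih hp.2 r]

-- rstrip does not affect a "Hint:" prefix (its last char ':' is not whitespace)
theorem pvStartswith_rstrip (x : List Char) :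
    PySem.Chars.startswith (PySem.Chars.rstrip x) "Hint:".toList = PySem.Chars.startswith x "Hint:".toList := by
  rw [Bool.eq_iff_iff, PySem.Chars.startswith_iff, PySem.Chars.startswith_iff]
  constructor
  · intro h
    refine h.trans ?_
    refine ⟨(x.reverse.takeWhile PySem.Chars.isspace).reverse, ?_⟩
    unfold PySem.Chars.rstrip
    rw [← List.reverse_append, List.takeWhile_append_dropWhile, List.reverse_reverse]
  · intro h
    obtain ⟨t, rfl⟩ := h
    unfold PySem.Chars.rstrip
    rw [List.reverse_append, List.dropWhile_append]
    by_cases he : (List.dropWhile PySem.Chars.isspace t.reverse).isEmpty = true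
    · rw [if_pos he]
      have hH : List.dropWhile PySem.Chars.isspace "Hint:".toList.reverse = "Hint:".toList.reverse := by decide
      rw [hH, List.reverse_reverse]
    · rw [if_neg he, List.reverse_append, List.reverse_reverse]
      exact List.prefix_append _ _

theorem pvChar_of_toNat {c d : Char} (h : c.toNat = d.toNat) : c = d :=
  Char.ext (UInt32.toNat_inj.mp h)

-- inside the domain, the only whitespace besides '\n' is space/tab/CR
theorem pvNonWs (c : Char) (hdc : pvDomChar c = true)
    (h1 : (c == ' ' || c == '\t' || c == '\r') = false) (h2 : ¬ (c = '\n')) :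
    PySem.Chars.isspace c = false := by
  simp only [Bool.or_eq_false_iff, beq_eq_false_iff_ne, ne_eq] at h1
  apply Bool.eq_false_iff.mpr
  intro hsp
  have e32 : c.toNat ≠ 32 := fun h => h1.1.1 (pvChar_of_toNat h)
  have e9 : c.toNat ≠ 9 := fun h => h1.1.2 (pvChar_of_toNat h)
  have e13 : c.toNat ≠ 13 := fun h => h1.2 (pvChar_of_toNat h)
  have e10 : c.toNat ≠ 10 := fun h => h2 (pvChar_of_toNat h)
  unfold pvDomChar at hdc
  unfold PySem.Chars.isspace at hsp
  simp at hdc hsp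
  omega

theorem pvSkip_eq : ∀ (cs : List Char), (∀ c ∈ cs, pvDomChar c = true) →
    PySem.Chars.startswith (pvSkipWs cs) "Hint:".toList
      = PySem.Chars.startswith (PySem.Chars.lstrip (cs.takeWhile (fun c => !(c == '\n')))) "Hint:".toList := by
  intro cs
  induction cs with
  | nil => intro _; rfl
  | cons c r ih =>
    intro hd
    have hdc : pvDomChar c = true := hd c (List.mem_cons_self ..)
    have hdr : ∀ a ∈ r, pvDomChar a = true := fun a ha => hd a (List.mem_cons_of_mem _ ha)
    by_cases hws : (c == ' ' || c == '\t' || c == '\r') = true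
    · have hnl : ¬ (c = '\n') := by
        rcases (by simpa using hws : (c = ' ' ∨ c = '\t') ∨ c = '\r') with (h | h) | h <;> simp [h]
      have hsp : PySem.Chars.isspace c = true := by
        rcases (by simpa using hws : (c = ' ' ∨ c = '\t') ∨ c = '\r') with (h | h) | h <;> simp [h] <;> decide
      have e1 : pvSkipWs (c :: r) = pvSkipWs r := by simp [pvSkipWs, hws]
      have e2 : (c :: r).takeWhile (fun c => !(c == '\n')) = c :: r.takeWhile (fun c => !(c == '\n')) := by
        simp [List.takeWhile_cons, hnl]
      rw [e1, e2]
      have e3 : PySem.Chars.lstrip (c :: r.takeWhile (fun c => !(c == '\n')))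
          = PySem.Chars.lstrip (r.takeWhile (fun c => !(c == '\n'))) := by
        unfold PySem.Chars.lstrip
        simp [List.dropWhile_cons, hsp]
      rw [e3]
      exact ih hdr
    · have hws' := Bool.eq_false_iff.mpr hws
      have e1 : pvSkipWs (c :: r) = c :: r := by simp [pvSkipWs, hws']
      by_cases hc : c = '\n'
      · subst hc
        rw [e1]
        have e2 : (('\n') :: r).takeWhile (fun c => !(c == '\n')) = [] := by
          simp [List.takeWhile_cons]
        rw [e2]
        rfl
      · have hsp : PySem.Chars.isspace c = false := pvNonWs c hdc hws' hc
        rw [e1]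
        have e2 : (c :: r).takeWhile (fun c => !(c == '\n')) = c :: r.takeWhile (fun c => !(c == '\n')) := by
          simp [List.takeWhile_cons, hc]
        rw [e2]
        have e3 : PySem.Chars.lstrip (c :: r.takeWhile (fun c => !(c == '\n')))
            = c :: r.takeWhile (fun c => !(c == '\n')) := by
          unfold PySem.Chars.lstrip
          simp [List.dropWhile_cons, hsp]
        rw [e3]
        show ("Hint:".toList.isPrefixOf (c :: r)) = ("Hint:".toList.isPrefixOf (c :: r.takeWhile (fun c => !(c == '\n'))))
        have := pvPrefixTW "Hint:".toList (by decide) (c :: r)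
        rw [← this]
        have e4 : (c :: r).takeWhile (fun c => !(c == '\n')) = c :: r.takeWhile (fun c => !(c == '\n')) := e2
        rw [e4]

theorem pvHintAt_eq (cs : List Char) (hd : ∀ c ∈ cs, pvDomChar c = true) :
    pvHintAt cs = pvHintLine (cs.takeWhile (fun c => !(c == '\n'))) := by
  calc pvHintAt cs
      = PySem.Chars.startswith (PySem.Chars.lstrip (cs.takeWhile (fun c => !(c == '\n')))) "Hint:".toList :=
        pvSkip_eq cs hd
    _ = PySem.Chars.startswith (PySem.Chars.rstrip (PySem.Chars.lstrip (cs.takeWhile (fun c => !(c == '\n'))))) "Hint:".toList :=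
        (pvStartswith_rstrip _).symm
    _ = pvHintLine (cs.takeWhile (fun c => !(c == '\n'))) := rfl

-- ---- strip lemmas ----

theorem pvRstrip_snoc_nl (y : List Char) :
    PySem.Chars.rstrip (y ++ ['\n']) = PySem.Chars.rstrip y := by
  unfold PySem.Chars.rstrip
  rw [List.reverse_append]
  simp [List.dropWhile_cons, show PySem.Chars.isspace '\n' = true from by decide]

theorem pvStrip_snoc_nl (x : List Char) :
    PySem.Chars.strip (x ++ ['\n']) = PySem.Chars.strip x := by
  show PySem.Chars.rstrip (PySem.Chars.lstrip (x ++ ['\n'])) = PySem.Chars.rstrip (PySem.Chars.lstrip x)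
  unfold PySem.Chars.lstrip
  rw [List.dropWhile_append]
  by_cases he : (List.dropWhile PySem.Chars.isspace x).isEmpty = true
  · rw [if_pos he, List.isEmpty_iff.mp he]
    rfl
  · rw [if_neg he]
    exact pvRstrip_snoc_nl _

-- ---- pvLoop characterisation ----

theorem pvLoop_hint (acc cs : List Char) (h : pvHintAt cs = true) : pvLoop acc cs = some acc := by
  rw [pvLoop]
  simp [h]

theorem pvLoop_nohint_none (acc cs : List Char) (h : pvHintAt cs = false) (hb : pvBreak cs = none) :
    pvLoop acc cs = none := by
  rw [pvLoop, if_neg (by simp [h])]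
  split
  · rfl
  · next l rest heq => rw [heq] at hb; cases hb

theorem pvLoop_nohint_some (acc cs l rest : List Char) (h : pvHintAt cs = false)
    (hb : pvBreak cs = some (l, rest)) :
    pvLoop acc cs = pvLoop (acc ++ l ++ ['\n']) rest := by
  rw [pvLoop, if_neg (by simp [h])]
  split
  · next heq => rw [heq] at hb; cases hb
  · next l' rest' heq =>
    rw [heq] at hb
    injection hb with hb'
    injection hb' with hl hr
    rw [hl, hr]

theorem pvLoop_shift : ∀ (n : Nat) (cs : List Char), cs.length ≤ n → ∀ acc,
    pvLoop acc cs = (pvLoop [] cs).map (fun p => acc ++ p) := by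
  intro n
  induction n using Nat.strong_induction_on with
  | _ n ih =>
    intro cs hn acc
    by_cases hH : pvHintAt cs = true
    · rw [pvLoop_hint acc cs hH, pvLoop_hint [] cs hH]; simp
    · have h := Bool.eq_false_iff.mpr hH
      cases hb : pvBreak cs with
      | none => rw [pvLoop_nohint_none acc cs h hb, pvLoop_nohint_none [] cs h hb]; rfl
      | some p =>
        obtain ⟨l, rest⟩ := p
        have hlt := pvBreak_length cs l rest hb
        rw [pvLoop_nohint_some acc cs l rest h hb, pvLoop_nohint_some [] cs l rest h hb]
        rw [ih rest.length (by omega) rest le_rfl (acc ++ l ++ ['\n']),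
            ih rest.length (by omega) rest le_rfl ([] ++ l ++ ['\n'])]
        cases pvLoop [] rest <;> simp [List.append_assoc]

-- the head of the line list is the first line
theorem pvSplit_head (cs : List Char) :
    ∃ tl, pvSplit [] cs = (cs.takeWhile (fun c => !(c == '\n'))) :: tl := by
  by_cases hmem : '\n' ∈ cs
  · obtain ⟨l, rest, rfl, hnl⟩ := pvDecomp cs hmem
    rw [pvTakeWhile_app l rest hnl]
    exact ⟨pvSplit [] rest, by simpa using pvSplit_app [] l rest hnl⟩
  · refine ⟨[], ?_⟩
    have e : pvSplit [] cs = [cs] := by simpa using pvSplit_no_nl [] cs hmem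
    rw [List.takeWhile_eq_self_iff.mpr ?_, e]
    intro x hx
    simp
    exact fun hxx => hmem (hxx ▸ hx)

theorem pvApre_hint_first (cs : List Char)
    (h : pvHintLine (cs.takeWhile (fun c => !(c == '\n'))) = true) : pvApre cs = [] := by
  obtain ⟨tl, htl⟩ := pvSplit_head cs
  unfold pvApre
  rw [htl, List.takeWhile_cons]
  simp [h, PySem.Chars.join_nil]

theorem pvApre_cons (l rest : List Char) (hnl : '\n' ∉ l) (hl : pvHintLine l = false)
    (hr : pvHintLine (rest.takeWhile (fun c => !(c == '\n'))) = false) :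
    pvApre (l ++ '\n' :: rest) = l ++ '\n' :: pvApre rest := by
  obtain ⟨tl, htl⟩ := pvSplit_head rest
  unfold pvApre
  rw [show pvSplit [] (l ++ '\n' :: rest) = l :: pvSplit [] rest by
        simpa using pvSplit_app [] l rest hnl]
  rw [htl, List.takeWhile_cons, List.takeWhile_cons]
  simp only [hl, hr, Bool.not_false, if_true]
  rw [PySem.Chars.join_cons_cons]
  simp

theorem pvApre_cons_hint (l rest : List Char) (hnl : '\n' ∉ l) (hl : pvHintLine l = false)
    (hr : pvHintLine (rest.takeWhile (fun c => !(c == '\n'))) = true) :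
    pvApre (l ++ '\n' :: rest) = l := by
  unfold pvApre
  rw [show pvSplit [] (l ++ '\n' :: rest) = l :: pvSplit [] rest by
        simpa using pvSplit_app [] l rest hnl]
  obtain ⟨tl, htl⟩ := pvSplit_head rest
  rw [htl, List.takeWhile_cons, List.takeWhile_cons]
  simp only [hl, hr, Bool.not_false, Bool.not_true, if_true, if_false]
  exact PySem.Chars.join_singleton _ _

-- main invariant: B's pre-strip value against A's
theorem pvMainAux : ∀ (n : Nat) (cs : List Char), cs.length ≤ n → (∀ c ∈ cs, pvDomChar c = true) →
    (pvLoop [] cs = none ∧ pvApre cs = cs)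
    ∨ (pvHintAt cs = true ∧ pvLoop [] cs = some [] ∧ pvApre cs = [])
    ∨ (pvLoop [] cs = some (pvApre cs ++ ['\n'])) := by
  intro n
  induction n using Nat.strong_induction_on with
  | _ n ih =>
    intro cs hn hd
    by_cases hmem : '\n' ∈ cs
    · obtain ⟨l, rest, rfl, hnl⟩ := pvDecomp cs hmem
      have hdr : ∀ a ∈ rest, pvDomChar a = true := by
        intro a ha; exact hd a (by simp [ha])
      have hHcs : pvHintAt (l ++ '\n' :: rest) = pvHintLine l := by
        rw [pvHintAt_eq _ hd, pvTakeWhile_app l rest hnl]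
      have hrec := ih rest.length (by simp at hn ⊢; omega) rest le_rfl hdr
      have hHrest : pvHintAt rest = pvHintLine (rest.takeWhile (fun c => !(c == '\n'))) :=
        pvHintAt_eq rest hdr
      by_cases hl : pvHintLine l = true
      · right; left
        refine ⟨hHcs.trans hl, pvLoop_hint _ _ (hHcs.trans hl), pvApre_hint_first _ ?_⟩
        rw [pvTakeWhile_app l rest hnl]; exact hl
      · have hl' := Bool.eq_false_iff.mpr hl
        have hstep : pvLoop [] (l ++ '\n' :: rest) = pvLoop ([] ++ l ++ ['\n']) rest :=
          pvLoop_nohint_some _ _ l rest (hHcs.trans hl') (pvBreak_app l rest hnl)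
        rw [pvLoop_shift rest.length rest le_rfl ([] ++ l ++ ['\n'])] at hstep
        rcases hrec with ⟨g1, g2⟩ | ⟨g0, g1, g2⟩ | g1
        · left
          have hHr : pvHintAt rest = false := by
            apply Bool.eq_false_iff.mpr; intro hh
            rw [pvLoop_hint [] rest hh] at g1; cases g1
          constructor
          · rw [hstep, g1]; rfl
          · rw [pvApre_cons l rest hnl hl' (hHrest ▸ hHr), g2]
        · right; right
          rw [hstep, g1]
          rw [pvApre_cons_hint l rest hnl hl' (hHrest ▸ g0)]
          simp
        · right; right
          have hHr : pvHintAt rest = false := by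
            apply Bool.eq_false_iff.mpr; intro hh
            rw [pvLoop_hint [] rest hh] at g1
            have := Option.some.inj g1
            simp at this
          rw [hstep, g1]
          rw [pvApre_cons l rest hnl hl' (hHrest ▸ hHr)]
          simp
    · -- no newline: a single line
      have hHcs : pvHintAt cs = pvHintLine cs := by
        rw [pvHintAt_eq _ hd, List.takeWhile_eq_self_iff.mpr ?_]
        intro x hx
        simp
        exact fun hxx => hmem (hxx ▸ hx)
      by_cases hl : pvHintLine cs = true
      · right; left
        refine ⟨hHcs.trans hl, pvLoop_hint _ _ (hHcs.trans hl), pvApre_hint_first _ ?_⟩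
        rw [List.takeWhile_eq_self_iff.mpr ?_]
        · exact hl
        · intro x hx
          simp
          exact fun hxx => hmem (hxx ▸ hx)
      · left
        have hl' := Bool.eq_false_iff.mpr hl
        constructor
        · exact pvLoop_nohint_none [] cs (hHcs.trans hl') (pvBreak_none cs hmem)
        · unfold pvApre
          have e : pvSplit [] cs = [cs] := by simpa using pvSplit_no_nl [] cs hmem
          rw [e, List.takeWhile_cons]
          simp only [hl', Bool.not_false, if_true]
          exact PySem.Chars.join_singleton _ _

theorem pvMain (cs : List Char) (hd : ∀ c ∈ cs, pvDomChar c = true) :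
    (pvLoop [] cs = none ∧ pvApre cs = cs)
    ∨ (pvHintAt cs = true ∧ pvLoop [] cs = some [] ∧ pvApre cs = [])
    ∨ (pvLoop [] cs = some (pvApre cs ++ ['\n'])) :=
  pvMainAux cs.length cs le_rfl hd

-- ===== VERDICT (by name: the statement is the Claim_ definition above) =====
theorem remove_hint_py_spec : Claim_equal_remove_hint_py := by
  intro t hdom
  unfold Spec_remove_hint_py
  have hd : ∀ c ∈ t.toList, pvDomChar c = true := by
    intro c hc
    exact List.all_eq_true.mp hdom c hc
  rw [pvA_char]
  rcases pvMain t.toList hd with ⟨h1, h2⟩ | ⟨_, h1, h2⟩ | h1 <;>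
    unfold remove_hint_py_alt <;> rw [h1]
  · exact congrArg (fun x => String.ofList (PySem.Chars.strip x)) h2
  · exact congrArg (fun x => String.ofList (PySem.Chars.strip x)) h2
  · exact (congrArg String.ofList (pvStrip_snoc_nl (pvApre t.toList))).symm
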